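-- pv_equiv track=rewrite | github.com/ncbi-nlp/PhenoTagger | src/evaluate.py | find_maxlen_entity_nest
-- ===== SOURCE A (Python) =====
-- def find_maxlen_entity_nest(nest_list):
--     temp_result_list={}
--     for i in range(0, len(nest_list)):
--         hpoid=nest_list[i][-1]
--         leng=len(nest_list[i][2].split())
--         if hpoid not in temp_result_list.keys():
--             temp_result_list[hpoid]=nest_list[i]
--         else:
--             if leng>len(temp_result_list[hpoid][2].split()):
--                 temp_result_list[hpoid]=nest_list[i]
--     new_list=[]
--     for hpoid in temp_result_list.keys():
--         new_list.append(temp_result_list[hpoid])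
--     return new_list
-- ===== SOURCE B (Python) =====
-- def find_maxlen_entity_nest(nest_list):
--     groups = {}
--     for entry in nest_list:
--         groups.setdefault(entry[-1], []).append(entry)
--     return [max(group, key=lambda e: len(e[2].split())) for group in groups.values()]
-- ===== Notes on version B (the rewrite author's own statement) =====
-- stated objective: simpler
-- what changed: Replaces the running-max dict update (compare-and-overwrite inside the scan, then a key walk) by group-all-then-reduce: one pass collects every entry under its hpoid with setdefault, a second pass takes max(group, key=word count) per group; first-appearance key order and first-maximum tie-breaking are preserved.
import Mathlib
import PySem

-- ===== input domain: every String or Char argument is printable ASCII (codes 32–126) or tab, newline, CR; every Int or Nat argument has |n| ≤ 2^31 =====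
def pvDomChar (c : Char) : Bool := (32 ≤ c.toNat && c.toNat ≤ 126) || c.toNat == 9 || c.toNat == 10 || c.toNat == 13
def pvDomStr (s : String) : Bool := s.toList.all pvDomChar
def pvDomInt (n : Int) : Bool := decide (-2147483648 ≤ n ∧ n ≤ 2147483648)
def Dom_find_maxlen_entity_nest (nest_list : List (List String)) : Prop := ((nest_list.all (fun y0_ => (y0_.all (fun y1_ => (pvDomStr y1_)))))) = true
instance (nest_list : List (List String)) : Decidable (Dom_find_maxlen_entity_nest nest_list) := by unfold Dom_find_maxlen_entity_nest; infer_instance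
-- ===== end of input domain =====

-- B groups all entries per hpoid in one pass, then reduces each group with max by word count
-- (first-appearance key order and first-maximum tie-breaking preserved); objective: simpler.


-- ===== PORT A =====
-- A's loop body: look up the running best for the entry's hpoid, overwrite it
-- if the new entry has strictly more words (or is the first with that hpoid).
def pvStepA (d : PySem.Dict String (List String)) (e : List String) :
    PySem.Dict String (List String) :=
  let hpoid := PySem.List.pyGetD e (-1) ""
  let leng := (PySem.Str.split₀ (PySem.List.pyGetD e 2 "")).length
  if d.contains hpoid = false then d.insert hpoid e
  else if leng > (PySem.Str.split₀ (PySem.List.pyGetD (d.getD hpoid []) 2 "")).length then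
    d.insert hpoid e
  else d

def find_maxlen_entity_nest (nest_list : List (List String)) : List (List String) :=
  let temp := nest_list.foldl pvStepA PySem.Dict.empty
  temp.keys.map (fun hpoid => temp.getD hpoid [])

-- ===== PORT B =====
def pvKey (e : List String) : String := PySem.List.pyGetD e (-1) ""
def pvWlen (e : List String) : Nat := (PySem.Str.split₀ (PySem.List.pyGetD e 2 "")).length

def find_maxlen_entity_nest_alt (nest_list : List (List String)) : List (List String) :=
  let groups := nest_list.foldl
    (fun d e => d.modify (pvKey e) [] (fun g => g ++ [e])) PySem.Dict.empty
  groups.values.map (fun g => PySem.List.maxD g pvWlen [])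

-- ===== PRECONDITION & SPEC =====
-- Pre_: every entry has at least 3 fields (Python A indexes entry[-1] and entry[2];
-- on shorter entries it raises IndexError).
def Pre_find_maxlen_entity_nest (nest_list : List (List String)) : Prop :=
  ∀ e ∈ nest_list, 3 ≤ e.length
instance (nest_list : List (List String)) : Decidable (Pre_find_maxlen_entity_nest nest_list) := by unfold Pre_find_maxlen_entity_nest; infer_instance

def pvWitness_find_maxlen_entity_nest : List (List String) :=
  [["a", "b", "c x", "H1"], ["d", "e", "c x y", "H1"], ["f", "g", "h", "H2"]]

def Spec_find_maxlen_entity_nest (nest_list : List (List String)) (out : List (List String)) : Prop := out = find_maxlen_entity_nest_alt nest_list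
instance (nest_list : List (List String)) (out : List (List String)) : Decidable (Spec_find_maxlen_entity_nest nest_list out) := by unfold Spec_find_maxlen_entity_nest; infer_instance

-- ===== CLAIM (what is proved, stated in full; the proofs are below) =====
def Claim_equal_find_maxlen_entity_nest : Prop := ∀ (nest_list : List (List String)), Dom_find_maxlen_entity_nest nest_list → Pre_find_maxlen_entity_nest nest_list → Spec_find_maxlen_entity_nest nest_list (find_maxlen_entity_nest nest_list)

-- ===== LEMMAS AND PROOFS =====

-- Python's max over a nonempty list: max? is some, and maxD is its value.
theorem pv_max?_isSome {α κ : Type} [LT κ] [DecidableLT κ] (g : List α) (key : α → κ)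
    (h : g ≠ []) : (PySem.List.max? g key).isSome := by
  cases g with
  | nil => exact absurd rfl h
  | cons a t =>
    show (List.foldl _ (some a) t).isSome
    clear h
    induction t generalizing a with
    | nil => rfl
    | cons b t ih =>
      simp only [List.foldl_cons]
      split <;> exact ih _

theorem pv_max?_append_singleton {α κ : Type} [LT κ] [DecidableLT κ]
    (g : List α) (e : α) (key : α → κ) :
    PySem.List.max? (g ++ [e]) key =
      match PySem.List.max? g key with
      | none => some e
      | some m => if key m < key e then some e else some m := by
  simp only [PySem.List.max?, List.foldl_append, List.foldl_cons, List.foldl_nil]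
  rfl

theorem pv_maxD_append_singleton {α κ : Type} [LT κ] [DecidableLT κ]
    (g : List α) (e : α) (key : α → κ) (d : α) (h : g ≠ []) :
    PySem.List.maxD (g ++ [e]) key d =
      if key (PySem.List.maxD g key d) < key e then e else PySem.List.maxD g key d := by
  have hs := pv_max?_isSome g key h
  unfold PySem.List.maxD
  rw [pv_max?_append_singleton]
  cases hm : PySem.List.max? g key with
  | none => rw [hm] at hs; simp at hs
  | some m => simp; split <;> simp

-- The loop invariant tying A's running-max dict to B's grouping dict:
-- same keys (same order, no duplicates) and, on every present key,
-- A's entry is the first word-count maximum of B's (nonempty) group.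
theorem pv_inv (l : List (List String))
    (dA : PySem.Dict String (List String)) (dG : PySem.Dict String (List (List String)))
    (hk : dA.keys = dG.keys) (hnd : dA.keys.Nodup)
    (hv : ∀ k, dG.contains k = true →
        dG.getD k [] ≠ [] ∧ dA.getD k [] = PySem.List.maxD (dG.getD k []) pvWlen []) :
    (l.foldl pvStepA dA).keys
        = (l.foldl (fun d e => d.modify (pvKey e) [] (fun g => g ++ [e])) dG).keys ∧
    (l.foldl pvStepA dA).keys.Nodup ∧
    (∀ k, (l.foldl (fun d e => d.modify (pvKey e) [] (fun g => g ++ [e])) dG).contains k = true →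
        (l.foldl (fun d e => d.modify (pvKey e) [] (fun g => g ++ [e])) dG).getD k [] ≠ [] ∧
        (l.foldl pvStepA dA).getD k []
          = PySem.List.maxD
              ((l.foldl (fun d e => d.modify (pvKey e) [] (fun g => g ++ [e])) dG).getD k [])
              pvWlen []) := by
  induction l generalizing dA dG with
  | nil => exact ⟨hk, hnd, hv⟩
  | cons e l ih =>
    simp only [List.foldl_cons]
    have hceq : ∀ k, dA.contains k = dG.contains k := by
      intro k
      rw [PySem.Dict.contains_eq_decide_mem_keys, PySem.Dict.contains_eq_decide_mem_keys, hk]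
    by_cases hc : dG.contains (pvKey e) = true
    · -- key already present: A compares, B appends to the group
      obtain ⟨hne, hm⟩ := hv _ hc
      have hcA' : dA.contains (PySem.List.pyGetD e (-1) "") = true := by
        rw [hceq]; exact hc
      have hstep : pvStepA dA e =
          if pvWlen e > pvWlen (dA.getD (pvKey e) []) then dA.insert (pvKey e) e else dA := by
        simp [pvStepA, pvKey, pvWlen, hcA']
      have hkA : (pvStepA dA e).keys = dA.keys := by
        rw [hstep]; split
        · exact PySem.Dict.keys_insert_of_contains _ _ (by rw [hceq]; exact hc)
        · rfl
      have hkG : (dG.modify (pvKey e) [] (fun g => g ++ [e])).keys = dG.keys := by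
        rw [PySem.Dict.keys_modify]
        exact PySem.Dict.keys_insert_of_contains _ _ hc
      apply ih
      · rw [hkA, hkG, hk]
      · rw [hkA]; exact hnd
      · intro k hck
        rw [PySem.Dict.contains_eq_decide_mem_keys, hkG,
            ← PySem.Dict.contains_eq_decide_mem_keys] at hck
        rw [PySem.Dict.getD_modify]
        by_cases hkk : k = pvKey e
        · subst hkk
          constructor
          · simp
          · simp only [if_true]
            rw [hstep]
            rw [pv_maxD_append_singleton _ _ _ _ hne, ← hm]
            split
            · simp [PySem.Dict.getD_insert_self]
            · rfl
        · rw [if_neg hkk]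
          refine ⟨(hv k hck).1, ?_⟩
          rw [hstep]
          split
          · rw [PySem.Dict.getD_insert, if_neg hkk]; exact (hv k hck).2
          · exact (hv k hck).2
    · -- fresh key: A inserts the entry, B starts the group [e]
      have hcA : dA.contains (pvKey e) = false := by rw [hceq]; simpa using hc
      have hcA' : dA.contains (PySem.List.pyGetD e (-1) "") = false := hcA
      have hstep : pvStepA dA e = dA.insert (pvKey e) e := by
        simp [pvStepA, pvKey, hcA']
      have hgd : dG.getD (pvKey e) [] = [] :=
        PySem.Dict.getD_of_not_contains _ _ (by simpa using hc)
      have hkG : (dG.modify (pvKey e) [] (fun g => g ++ [e])).keys = dG.keys ++ [pvKey e] := by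
        rw [PySem.Dict.keys_modify]
        exact PySem.Dict.keys_insert_of_not_contains _ _ (by simpa using hc)
      apply ih
      · rw [hstep, PySem.Dict.keys_insert_of_not_contains _ _ hcA, hkG, hk]
      · rw [hstep, PySem.Dict.keys_insert_of_not_contains _ _ hcA]
        simp only [List.nodup_append, List.nodup_cons]
        refine ⟨hnd, by simp, ?_⟩
        intro x hx y hy
        simp at hy; subst hy
        intro hxy; subst hxy
        rw [PySem.Dict.contains_eq_decide_mem_keys, hk] at hcA
        simp at hcA
        exact hcA (hk ▸ hx)
      · intro k hck
        rw [hstep, PySem.Dict.getD_modify, PySem.Dict.getD_insert]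
        by_cases hkk : k = pvKey e
        · subst hkk
          rw [if_pos rfl, if_pos rfl, hgd]
          exact ⟨by simp, by simp [PySem.List.maxD, PySem.List.max?]⟩
        · rw [if_neg hkk, if_neg hkk]
          rw [PySem.Dict.contains_modify] at hck
          rcases Bool.or_eq_true_iff.mp hck with h1 | h1
          · exact absurd (eq_of_beq h1) hkk
          · exact hv k h1

-- ===== VERDICT (by name: the statement is the Claim_ definition above) =====
theorem find_maxlen_entity_nest_spec : Claim_equal_find_maxlen_entity_nest := by
  intro nl _ _
  unfold Spec_find_maxlen_entity_nest find_maxlen_entity_nest find_maxlen_entity_nest_alt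
  obtain ⟨hk, hnd, hv⟩ := pv_inv nl PySem.Dict.empty PySem.Dict.empty rfl
    PySem.Dict.nodup_keys_empty (by intro k hc; simp [PySem.Dict.contains_empty] at hc)
  set tA := nl.foldl pvStepA PySem.Dict.empty with htA
  set tG := nl.foldl (fun d e => d.modify (pvKey e) [] (fun g => g ++ [e])) PySem.Dict.empty
  have hndG : tG.keys.Nodup := hk ▸ hnd
  show List.map (fun hpoid => tA.getD hpoid []) tA.keys
      = List.map (fun g => PySem.List.maxD g pvWlen []) tG.values
  rw [PySem.Dict.values_eq_map_keys tG hndG []]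
  rw [List.map_map, hk]
  apply List.map_congr_left
  intro k hkmem
  have hc : tG.contains k = true := by
    rw [PySem.Dict.contains_eq_decide_mem_keys]; simpa using hkmem
  exact (hv k hc).2
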